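-- pv_equiv track=rewrite | github.com/cedricwhitney/NUP-annotator | src/tools/one_time_split.py | distribute_rows
-- ===== SOURCE A (Python) =====
-- def distribute_rows(num_annotators=12, rows_per_annotator=20):
--     """
--     Returns a dictionary mapping row IDs to annotator pairs.
--     Each annotator gets exactly rows_per_annotator rows.
--     Each row is assigned to exactly 2 annotators.
--     """
--     total_rows = (num_annotators * rows_per_annotator) // 2
--     assignment = {}
--
--     for i in range(total_rows):
--         a = i % num_annotators
--         b = (a + (i // num_annotators) + 1) % num_annotators
--         assignment[i] = [a, b]
--
--     return assignment
-- ===== SOURCE B (Python) =====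
-- def distribute_rows(num_annotators=12, rows_per_annotator=20):
--     """Rotation-based: zip range(n) with its slice-rotation to build whole rounds,
--     accumulate rounds until enough pairs exist, then truncate and enumerate."""
--     total_rows = (num_annotators * rows_per_annotator) // 2
--     if total_rows <= 0:
--         return {}
--     base = list(range(num_annotators))
--     pairs = []
--     q = 0
--     while len(pairs) < total_rows:
--         shift = (q + 1) % num_annotators
--         partner = base[shift:] + base[:shift]
--         pairs.extend(zip(base, partner))
--         q += 1
--     return {i: [a, b] for i, (a, b) in enumerate(pairs[:total_rows])}
-- ===== Notes on version B (the rewrite author's own statement) =====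
-- stated objective: alternative
-- what changed: Replaces per-index modular arithmetic (i % n, i // n) by a data-level construction: each round is zip(range(n), rotation-of-range(n)-by-slicing), rounds are accumulated in a flat pair list until it is long enough, and the dict is built by truncating and enumerating that list.
-- outside the precondition, e.g. on distribute_rows(-3, -1): A returns {0: [0, -2]}, B does not finish within the time limit
import Mathlib
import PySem

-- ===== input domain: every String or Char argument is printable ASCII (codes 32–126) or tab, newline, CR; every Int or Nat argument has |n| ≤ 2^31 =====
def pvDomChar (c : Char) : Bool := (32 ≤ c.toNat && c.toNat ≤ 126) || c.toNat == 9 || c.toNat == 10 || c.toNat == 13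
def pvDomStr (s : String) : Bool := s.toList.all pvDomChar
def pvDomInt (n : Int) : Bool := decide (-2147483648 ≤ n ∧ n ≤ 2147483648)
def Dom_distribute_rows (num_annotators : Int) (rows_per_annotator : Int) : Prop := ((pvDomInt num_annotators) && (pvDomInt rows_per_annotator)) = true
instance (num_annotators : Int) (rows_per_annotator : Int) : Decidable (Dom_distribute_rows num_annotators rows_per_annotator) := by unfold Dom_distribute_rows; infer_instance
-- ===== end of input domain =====

-- B drops all per-index modular arithmetic: it builds whole rounds as zip(range(n), rotation by
-- slicing), accumulates them until enough pairs exist, then truncates and enumerates.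

-- ===== PORT A =====
def distribute_rows (num_annotators : Int) (rows_per_annotator : Int) : List (Int × List Int) :=
  let total_rows := PySem.Int.floordiv (num_annotators * rows_per_annotator) 2
  ((PySem.List.pyRange 0 total_rows 1).foldl
    (fun assignment i =>
      let a := PySem.Int.mod i num_annotators
      let b := PySem.Int.mod (a + PySem.Int.floordiv i num_annotators + 1) num_annotators
      assignment.insert i [a, b])
    (PySem.Dict.empty : PySem.Dict Int (List Int))).items

-- ===== PORT B =====
-- one round: zip(base, base[shift:] + base[:shift])
def pvRound (base : List Int) (shift : Int) : List (Int × Int) :=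
  base.zip (PySem.List.slice base (some shift) none ++ PySem.List.slice base none (some shift))

-- the while loop: extend `pairs` by one round until len(pairs) >= total.
-- The `step = []` early exit is only a totality guard: there Python's loop never terminates.
def pvLoop (total n : Int) (base : List Int) (q : Int) (pairs : List (Int × Int)) :
    List (Int × Int) :=
  if h : (pairs.length : Int) < total then
    let step := pvRound base (PySem.Int.mod (q + 1) n)
    if hs : step = [] then pairs
    else pvLoop total n base (q + 1) (pairs ++ step)
  else pairs
termination_by (total - pairs.length).toNat
decreasing_by
  have h3 : 0 < (pvRound base (PySem.Int.mod (q + 1) n)).length :=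
    List.length_pos_of_ne_nil hs
  have h2 : (pairs.length : Int) < total := h
  simp only [List.length_append]
  omega

def distribute_rows_alt (num_annotators : Int) (rows_per_annotator : Int) : List (Int × List Int) :=
  let total_rows := PySem.Int.floordiv (num_annotators * rows_per_annotator) 2
  if total_rows ≤ 0 then (PySem.Dict.empty : PySem.Dict Int (List Int)).items
  else
    let base := PySem.List.pyRange 0 num_annotators 1
    let pairs := pvLoop total_rows num_annotators base 0 []
    ((PySem.List.enumerate (PySem.List.slice pairs none (some total_rows)) 0).foldl
      (fun d p => d.insert p.1 [p.2.1, p.2.2])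
      (PySem.Dict.empty : PySem.Dict Int (List Int))).items

-- ===== PRECONDITION & SPEC =====
-- Pre_ excludes the meaningless both-negative argument pairs, on which A's flat modular loop
-- returns a dict of negative "annotator" indices (an artefact of Python's flooring % and //)
-- while B's while-loop never terminates.
def Pre_distribute_rows (num_annotators : Int) (rows_per_annotator : Int) : Prop :=
  0 ≤ num_annotators ∨ 0 ≤ rows_per_annotator
instance (num_annotators : Int) (rows_per_annotator : Int) : Decidable (Pre_distribute_rows num_annotators rows_per_annotator) := by unfold Pre_distribute_rows; infer_instance

def pvWitness_distribute_rows : Int × Int := (12, 20)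

def Spec_distribute_rows (num_annotators : Int) (rows_per_annotator : Int) (out : List (Int × List Int)) : Prop := out = distribute_rows_alt num_annotators rows_per_annotator
instance (num_annotators : Int) (rows_per_annotator : Int) (out : List (Int × List Int)) : Decidable (Spec_distribute_rows num_annotators rows_per_annotator out) := by unfold Spec_distribute_rows; infer_instance

-- ===== CLAIM (what is proved, stated in full; the proofs are below) =====
def Claim_equal_distribute_rows : Prop := ∀ (num_annotators : Int) (rows_per_annotator : Int), Dom_distribute_rows num_annotators rows_per_annotator → Pre_distribute_rows num_annotators rows_per_annotator → Spec_distribute_rows num_annotators rows_per_annotator (distribute_rows num_annotators rows_per_annotator)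

-- ===== LEMMAS AND PROOFS =====

-- the pair A computes for flat row index i
def pvPair (n i : Int) : Int × Int :=
  (PySem.Int.mod i n, PySem.Int.mod (PySem.Int.mod i n + PySem.Int.floordiv i n + 1) n)

def pvEntry (n i : Int) : Int × List Int :=
  (i, [(pvPair n i).1, (pvPair n i).2])

lemma pv_div_mul_add (t r n : Int) (hn : 1 ≤ n) (h0 : 0 ≤ r) (hr : r < n) :
    PySem.Int.floordiv (t * n + r) n = t ∧ PySem.Int.mod (t * n + r) n = r := by
  have hd : PySem.Int.floordiv (t * n + r) n = t := by
    rw [PySem.Int.floordiv_eq_iff_of_pos (by omega)]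
    constructor <;> nlinarith
  refine ⟨hd, ?_⟩
  have := PySem.Int.floordiv_mul_add_mod (t * n + r) n
  rw [hd] at this; omega

-- one round of B equals the corresponding block of A's flat pairs
lemma pvRound_eq_block (n q : Int) (hn : 1 ≤ n) (hq : 0 ≤ q) :
    pvRound (PySem.List.pyRange 0 n 1) (PySem.Int.mod (q + 1) n)
      = (PySem.List.pyRange (q * n) ((q + 1) * n) 1).map (pvPair n) := by
  set shift := PySem.Int.mod (q + 1) n with hshift
  have hs0 : 0 ≤ shift := PySem.Int.mod_nonneg _ (by omega)
  have hsn : shift < n := PySem.Int.mod_lt _ (by omega)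
  have hqd := PySem.Int.floordiv_mul_add_mod (q + 1) n
  have hlenbase : (PySem.List.pyRange 0 n 1).length = n.toNat := by
    simp [PySem.List.length_pyRange_one]
  have hdrop : PySem.List.slice (PySem.List.pyRange 0 n 1) (some shift) none
      = (PySem.List.pyRange 0 n 1).drop shift.toNat := PySem.List.slice_from _ hs0
  have htake : PySem.List.slice (PySem.List.pyRange 0 n 1) none (some shift)
      = (PySem.List.pyRange 0 n 1).take shift.toNat := PySem.List.slice_to _ hs0
  have hlend : (PySem.List.slice (PySem.List.pyRange 0 n 1) (some shift) none).length
      = n.toNat - shift.toNat := by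
    rw [hdrop]; simp [hlenbase]
  have hlent : (PySem.List.slice (PySem.List.pyRange 0 n 1) none (some shift)).length
      = shift.toNat := by
    rw [htake]; simp [hlenbase]; omega
  have hpartlen : (PySem.List.slice (PySem.List.pyRange 0 n 1) (some shift) none
      ++ PySem.List.slice (PySem.List.pyRange 0 n 1) none (some shift)).length = n.toNat := by
    simp only [List.length_append, hlend, hlent]
    omega
  have hmulsucc : (q + 1) * n = q * n + n := by ring
  apply List.ext_getElem
  · simp only [pvRound, List.length_zip, hlenbase, hpartlen, List.length_map,
      PySem.List.length_pyRange_one]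
    omega
  · intro k h1 h2
    have hk : k < n.toNat := by
      simpa [pvRound, List.length_zip, hlenbase, hpartlen] using h1
    have hkInt : (k : Int) < n := by omega
    have hpairs := pv_div_mul_add q (k : Int) n hn (by omega) hkInt
    have hfst : PySem.Int.mod (q * n + (k : Int)) n = (k : Int) := hpairs.2
    have hdiv : PySem.Int.floordiv (q * n + (k : Int)) n = q := hpairs.1
    have hsnd : PySem.Int.mod ((k : Int) + q + 1) n
        = (if (k : Int) + shift < n then (k : Int) + shift else (k : Int) + shift - n) := by
      by_cases hc : (k : Int) + shift < n
      · rw [if_pos hc]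
        have he : (k : Int) + q + 1 = (PySem.Int.floordiv (q + 1) n) * n + ((k : Int) + shift) := by
          omega
        rw [he]
        exact (pv_div_mul_add _ _ _ hn (by omega) hc).2
      · rw [if_neg hc]
        have hexp : (PySem.Int.floordiv (q + 1) n + 1) * n
            = PySem.Int.floordiv (q + 1) n * n + n := by ring
        have he : (k : Int) + q + 1
            = (PySem.Int.floordiv (q + 1) n + 1) * n + ((k : Int) + shift - n) := by
          rw [hexp]; omega
        rw [he]
        exact (pv_div_mul_add _ _ _ hn (by omega) (by omega)).2
    have hpartner : (PySem.List.slice (PySem.List.pyRange 0 n 1) (some shift) none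
        ++ PySem.List.slice (PySem.List.pyRange 0 n 1) none (some shift))[k]'(by omega)
        = (if (k : Int) + shift < n then (k : Int) + shift else (k : Int) + shift - n) := by
      by_cases hc : k < n.toNat - shift.toNat
      · rw [List.getElem_append_left (by omega)]
        have : (PySem.List.slice (PySem.List.pyRange 0 n 1) (some shift) none)[k]'(by omega)
            = (PySem.List.pyRange 0 n 1)[shift.toNat + k]'(by omega) := by
          simp only [hdrop, List.getElem_drop]
        rw [this, PySem.List.getElem_pyRange_one]
        rw [if_pos (by omega)]
        push_cast
        omega
      · rw [List.getElem_append_right (by omega)]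
        have : (PySem.List.slice (PySem.List.pyRange 0 n 1) none (some shift))[k - (PySem.List.slice (PySem.List.pyRange 0 n 1) (some shift) none).length]'(by omega)
            = (PySem.List.pyRange 0 n 1)[k - (n.toNat - shift.toNat)]'(by omega) := by
          simp only [htake, List.getElem_take, hlend]
        rw [this, PySem.List.getElem_pyRange_one]
        rw [if_neg (by omega)]
        push_cast
        omega
    simp only [pvRound, List.getElem_zip, List.getElem_map, PySem.List.getElem_pyRange_one,
      hpartner]
    simp only [pvPair, hfst, hdiv, Prod.mk.injEq, zero_add]
    exact ⟨trivial, hsnd.symm⟩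

-- the loop turns q complete rounds into m complete rounds with m*n ≥ total
lemma pvLoop_spec (total n : Int) (hn : 1 ≤ n) :
    ∀ (q : Int), 0 ≤ q →
      ∃ m, q ≤ m ∧ total ≤ m * n ∧
        pvLoop total n (PySem.List.pyRange 0 n 1) q
            ((PySem.List.pyRange 0 (q * n) 1).map (pvPair n))
          = (PySem.List.pyRange 0 (m * n) 1).map (pvPair n) := by
  intro q hq
  have hlen : (((PySem.List.pyRange 0 (q * n) 1).map (pvPair n)).length : Int) = q * n := by
    have hqn : 0 ≤ q * n := mul_nonneg hq (by omega)
    simp only [List.length_map, PySem.List.length_pyRange_one]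
    omega
  by_cases h : ((((PySem.List.pyRange 0 (q * n) 1).map (pvPair n)).length : Int) < total)
  · -- loop body runs
    have hstep := pvRound_eq_block n q hn hq
    have hsteplen : (pvRound (PySem.List.pyRange 0 n 1) (PySem.Int.mod (q + 1) n)).length
        = n.toNat := by
      rw [hstep]
      have hmulsucc : (q + 1) * n = q * n + n := by ring
      simp only [List.length_map, PySem.List.length_pyRange_one]
      omega
    have hstepne : pvRound (PySem.List.pyRange 0 n 1) (PySem.Int.mod (q + 1) n) ≠ [] := by
      apply List.ne_nil_of_length_pos
      omega
    have hcomb : (PySem.List.pyRange 0 (q * n) 1).map (pvPair n)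
        ++ pvRound (PySem.List.pyRange 0 n 1) (PySem.Int.mod (q + 1) n)
        = (PySem.List.pyRange 0 ((q + 1) * n) 1).map (pvPair n) := by
      rw [hstep, ← List.map_append]
      congr 1
      exact (PySem.List.pyRange_one_append 0 (q * n) ((q + 1) * n)
        (mul_nonneg hq (by omega)) (by nlinarith)).symm
    rw [pvLoop]
    rw [dif_pos h]
    simp only [dif_neg hstepne]
    rw [hcomb]
    obtain ⟨m, hm1, hm2, hm3⟩ := pvLoop_spec total n hn (q + 1) (by omega)
    exact ⟨m, by omega, hm2, hm3⟩
  · -- loop exits: total ≤ q*n already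
    refine ⟨q, le_rfl, by omega, ?_⟩
    rw [pvLoop, dif_neg h]
termination_by q => (total - q * n).toNat
decreasing_by
  rw [hlen] at h
  have : q * n < (q + 1) * n := by nlinarith
  omega

-- A's dict items, flattened
lemma pvA_items (n total : Int) :
    ((PySem.List.pyRange 0 total 1).foldl
      (fun assignment i =>
        assignment.insert i [PySem.Int.mod i n,
          PySem.Int.mod (PySem.Int.mod i n + PySem.Int.floordiv i n + 1) n])
      (PySem.Dict.empty : PySem.Dict Int (List Int))).items
      = (PySem.List.pyRange 0 total 1).map (pvEntry n) := by
  rw [PySem.Dict.items_foldl_insert_fresh _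
    (fun i : Int => i)
    (fun i => [PySem.Int.mod i n,
      PySem.Int.mod (PySem.Int.mod i n + PySem.Int.floordiv i n + 1) n])
    PySem.Dict.empty
    (by intro a _; simp)
    (by simpa using PySem.List.nodup_pyRange_one 0 total)]
  rfl

-- ===== VERDICT (by name: the statement is the Claim_ definition above) =====
theorem distribute_rows_spec : Claim_equal_distribute_rows := by
  intro n r _ hpre
  unfold Spec_distribute_rows
  have hAdef : distribute_rows n r
      = ((PySem.List.pyRange 0 (PySem.Int.floordiv (n * r) 2) 1).foldl
          (fun assignment i =>
            assignment.insert i [PySem.Int.mod i n,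
              PySem.Int.mod (PySem.Int.mod i n + PySem.Int.floordiv i n + 1) n])
          (PySem.Dict.empty : PySem.Dict Int (List Int))).items := rfl
  have hBdef : distribute_rows_alt n r
      = if PySem.Int.floordiv (n * r) 2 ≤ 0 then
          (PySem.Dict.empty : PySem.Dict Int (List Int)).items
        else
          ((PySem.List.enumerate (PySem.List.slice
              (pvLoop (PySem.Int.floordiv (n * r) 2) n (PySem.List.pyRange 0 n 1) 0 [])
              none (some (PySem.Int.floordiv (n * r) 2))) 0).foldl
            (fun d p => d.insert p.1 [p.2.1, p.2.2])
            (PySem.Dict.empty : PySem.Dict Int (List Int))).items := rfl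
  rw [hAdef, hBdef]
  set total := PySem.Int.floordiv (n * r) 2 with htotal
  by_cases htot : total ≤ 0
  · rw [if_pos htot, PySem.List.pyRange_one_eq_nil htot]
    rfl
  · rw [if_neg htot]
    push_neg at htot
    have h2 : 2 ≤ n * r := by
      have := (PySem.Int.le_floordiv_iff_mul_le (a := n * r) (b := 2) (q := 1) (by omega)).mp
        (by omega)
      omega
    have hn : 1 ≤ n := by
      rcases hpre with h | h
      · by_contra hc
        have hz : n = 0 := by omega
        rw [hz, zero_mul] at h2; omega
      · by_contra hc
        have : n * r ≤ 0 := mul_nonpos_of_nonpos_of_nonneg (by omega) h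
        omega
    -- characterize the loop result
    obtain ⟨m, hm0, hmt, hloop⟩ := pvLoop_spec total n hn 0 le_rfl
    have hnil : (PySem.List.pyRange 0 ((0 : Int) * n) 1).map (pvPair n) = [] := by
      rw [zero_mul, PySem.List.pyRange_one_eq_nil le_rfl]
      rfl
    rw [← hnil, hloop]
    have hmn0 : 0 ≤ m * n := by omega
    -- the truncation
    have hslice : PySem.List.slice ((PySem.List.pyRange 0 (m * n) 1).map (pvPair n)) none (some total)
        = (PySem.List.pyRange 0 total 1).map (pvPair n) := by
      rw [PySem.List.slice_to _ (by omega)]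
      rw [← List.map_take]
      congr 1
      apply List.ext_getElem
      · simp only [List.length_take, PySem.List.length_pyRange_one]
        omega
      · intro k h1 h2
        rw [List.getElem_take]
        rw [PySem.List.getElem_pyRange_one, PySem.List.getElem_pyRange_one]
    rw [hslice]
    -- the dict comprehension over enumerate
    rw [PySem.Dict.items_foldl_insert_fresh _
      (fun p : Int × (Int × Int) => p.1)
      (fun p : Int × (Int × Int) => [p.2.1, p.2.2])
      PySem.Dict.empty
      (by intro a _; simp)
      (by
        rw [PySem.List.map_fst_enumerate]
        exact PySem.List.nodup_pyRange_one _ _)]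
    rw [pvA_items]
    show (PySem.List.pyRange 0 total 1).map (pvEntry n)
        = [] ++ (PySem.List.enumerate ((PySem.List.pyRange 0 total 1).map (pvPair n)) 0).map
            (fun p => (p.1, [p.2.1, p.2.2]))
    rw [List.nil_append]
    apply List.ext_getElem
    · simp [PySem.List.length_enumerate]
    · intro k h1 h2
      rw [List.getElem_map, List.getElem_map, PySem.List.getElem_enumerate]
      simp only [List.getElem_map, PySem.List.getElem_pyRange_one, pvEntry, zero_add]
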